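-- pv_equiv track=rewrite | github.com/ztsalexey/epoch-bench | epoch_bench/scaling.py | _infer_family
-- ===== SOURCE A (Python) =====
-- DEFAULT_FAMILIES: dict[str, list[str]] = {
--     "anthropic": [
--         "claude-3-5-haiku-latest",
--         "claude-sonnet-4-6",
--         "claude-opus-4-6",
--     ],
--     "openai": [
--         "gpt-4o-mini",
--         "gpt-4o",
--         "o1-mini",
--         "o1",
--     ],
--     "gemini": [
--         "gemini-1.5-flash",
--         "gemini-1.5-pro",
--         "gemini-2.0-flash",
--     ],
--     "deepseek": [
--         "deepseek-chat",
--         "deepseek-reasoner",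
--     ],
-- }
--
-- def _infer_family(model: str) -> str | None:
--     """Try to infer family from model name."""
--     for family, models in DEFAULT_FAMILIES.items():
--         if model in models:
--             return family
--     lower = model.lower()
--     if "claude" in lower:
--         return "anthropic"
--     if "gpt" in lower or lower.startswith("o1") or lower.startswith("o3"):
--         return "openai"
--     if "gemini" in lower:
--         return "gemini"
--     if "deepseek" in lower:
--         return "deepseek"
--     return None
-- ===== SOURCE B (Python) =====
-- _RULES = [
--     (lambda s: "claude" in s, "anthropic"),
--     (lambda s: "gpt" in s or s.startswith("o1") or s.startswith("o3"), "openai"),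
--     (lambda s: "gemini" in s, "gemini"),
--     (lambda s: "deepseek" in s, "deepseek"),
-- ]
--
--
-- def _infer_family(model: str) -> str | None:
--     """Classify from the lowercased name with one rule-table pass; the exact-match
--     table is redundant because every entry is matched by its own family's rule."""
--     lower = model.lower()
--     return next((fam for pred, fam in _RULES if pred(lower)), None)
-- ===== Notes on version B (the rewrite author's own statement) =====
-- stated objective: simpler
-- what changed: B drops A's exact-match scan over DEFAULT_FAMILIES entirely (each entry is subsumed by its own family's heuristic and matched by no earlier rule) and replaces the if-cascade by a single next() over a rule table of (predicate, family) pairs.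
import Mathlib
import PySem

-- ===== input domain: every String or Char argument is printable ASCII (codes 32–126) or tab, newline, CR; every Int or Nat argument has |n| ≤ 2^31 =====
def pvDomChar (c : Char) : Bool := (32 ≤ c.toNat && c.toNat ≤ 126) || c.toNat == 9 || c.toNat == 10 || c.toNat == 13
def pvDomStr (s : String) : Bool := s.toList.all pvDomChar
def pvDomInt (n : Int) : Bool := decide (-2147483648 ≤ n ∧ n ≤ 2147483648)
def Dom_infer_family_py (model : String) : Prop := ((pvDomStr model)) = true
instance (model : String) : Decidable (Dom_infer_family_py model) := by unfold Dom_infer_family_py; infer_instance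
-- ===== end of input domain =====

-- B drops A's exact-match scan over DEFAULT_FAMILIES (each entry is subsumed by its own
-- family's heuristic rule and matched by no earlier rule) and replaces the if-cascade by a
-- single first-match pass over a rule table; objective: simpler.

-- ===== PORT A =====
-- DEFAULT_FAMILIES as an association list in insertion order
def DEFAULT_FAMILIES : List (String × List String) :=
  [("anthropic", ["claude-3-5-haiku-latest", "claude-sonnet-4-6", "claude-opus-4-6"]),
   ("openai", ["gpt-4o-mini", "gpt-4o", "o1-mini", "o1"]),
   ("gemini", ["gemini-1.5-flash", "gemini-1.5-pro", "gemini-2.0-flash"]),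
   ("deepseek", ["deepseek-chat", "deepseek-reasoner"])]

-- the 'for family, models in DEFAULT_FAMILIES.items(): if model in models: return family' loop
def inferFamilyLoop (model : String) : List (String × List String) → Option String
  | [] => none
  | (family, models) :: rest =>
      if model ∈ models then some family else inferFamilyLoop model rest

def infer_family_py (model : String) : Option String :=
  match inferFamilyLoop model DEFAULT_FAMILIES with
  | some family => some family
  | none =>
      let lower := PySem.Str.lower model
      if PySem.Str.isIn "claude" lower then some "anthropic"
      else if PySem.Str.isIn "gpt" lower || PySem.Str.startswith lower "o1" || PySem.Str.startswith lower "o3" then some "openai"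
      else if PySem.Str.isIn "gemini" lower then some "gemini"
      else if PySem.Str.isIn "deepseek" lower then some "deepseek"
      else none

-- ===== PORT B =====
-- the rule table _RULES: (predicate on the lowercased name, family)
def pvRules : List ((String → Bool) × String) :=
  [(fun s => PySem.Str.isIn "claude" s, "anthropic"),
   (fun s => PySem.Str.isIn "gpt" s || PySem.Str.startswith s "o1" || PySem.Str.startswith s "o3", "openai"),
   (fun s => PySem.Str.isIn "gemini" s, "gemini"),
   (fun s => PySem.Str.isIn "deepseek" s, "deepseek")]

def infer_family_py_alt (model : String) : Option String :=
  let lower := PySem.Str.lower model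
  ((pvRules.find? (fun r => r.1 lower)).map (fun r => r.2))

-- ===== PRECONDITION & SPEC =====
def Spec_infer_family_py (model : String) (out : Option String) : Prop := out = infer_family_py_alt model
instance (model : String) (out : Option String) : Decidable (Spec_infer_family_py model out) := by unfold Spec_infer_family_py; infer_instance

-- ===== CLAIM (what is proved, stated in full; the proofs are below) =====
def Claim_equal_infer_family_py : Prop := ∀ (model : String), Dom_infer_family_py model → Spec_infer_family_py model (infer_family_py model)

-- ===== LEMMAS AND PROOFS =====

-- when the model is none of the 12 table entries, A's dict loop falls through
theorem loop_none (model : String)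
    (h1 : model ≠ "claude-3-5-haiku-latest") (h2 : model ≠ "claude-sonnet-4-6")
    (h3 : model ≠ "claude-opus-4-6") (h4 : model ≠ "gpt-4o-mini") (h5 : model ≠ "gpt-4o")
    (h6 : model ≠ "o1-mini") (h7 : model ≠ "o1") (h8 : model ≠ "gemini-1.5-flash")
    (h9 : model ≠ "gemini-1.5-pro") (h10 : model ≠ "gemini-2.0-flash")
    (h11 : model ≠ "deepseek-chat") (h12 : model ≠ "deepseek-reasoner") :
    inferFamilyLoop model DEFAULT_FAMILIES = none := by
  simp [inferFamilyLoop, DEFAULT_FAMILIES, h1, h2, h3, h4, h5, h6, h7, h8, h9, h10, h11, h12]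

-- ===== VERDICT (by name: the statement is the Claim_ definition above) =====
theorem infer_family_py_spec : Claim_equal_infer_family_py := by
  intro model _
  unfold Spec_infer_family_py
  by_cases h1 : model = "claude-3-5-haiku-latest"; · subst h1; decide
  by_cases h2 : model = "claude-sonnet-4-6"; · subst h2; decide
  by_cases h3 : model = "claude-opus-4-6"; · subst h3; decide
  by_cases h4 : model = "gpt-4o-mini"; · subst h4; decide
  by_cases h5 : model = "gpt-4o"; · subst h5; decide
  by_cases h6 : model = "o1-mini"; · subst h6; decide
  by_cases h7 : model = "o1"; · subst h7; decide
  by_cases h8 : model = "gemini-1.5-flash"; · subst h8; decide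
  by_cases h9 : model = "gemini-1.5-pro"; · subst h9; decide
  by_cases h10 : model = "gemini-2.0-flash"; · subst h10; decide
  by_cases h11 : model = "deepseek-chat"; · subst h11; decide
  by_cases h12 : model = "deepseek-reasoner"; · subst h12; decide
  have hl := loop_none model h1 h2 h3 h4 h5 h6 h7 h8 h9 h10 h11 h12
  simp only [infer_family_py, hl, infer_family_py_alt, pvRules, List.find?]
  cases hb1 : PySem.Str.isIn "claude" (PySem.Str.lower model) <;>
    cases hb2 : (PySem.Str.isIn "gpt" (PySem.Str.lower model) ||
        PySem.Str.startswith (PySem.Str.lower model) "o1" ||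
        PySem.Str.startswith (PySem.Str.lower model) "o3") <;>
    cases hb3 : PySem.Str.isIn "gemini" (PySem.Str.lower model) <;>
    cases hb4 : PySem.Str.isIn "deepseek" (PySem.Str.lower model) <;>
    simp_all
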